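-- pv_equiv track=rewrite | github.com/kainaw/simdif | src/simdif/metrics/osa.py | _osa_matrix
-- ===== SOURCE A (Python) =====
-- def _osa_matrix(s1, s2) -> list:
--     """
--     Optimal String Alignment (OSA) distance matrix.
--     Restricted edit distance: a substring can only be edited once.
--     Does NOT satisfy the triangle inequality.
--     """
--     len1, len2 = len(s1), len(s2)
--     matrix = [[0] * (len2 + 1) for _ in range(len1 + 1)]
--
--     for i in range(len1 + 1):
--         matrix[i][0] = i
--     for j in range(len2 + 1):
--         matrix[0][j] = j
--
--     for i in range(1, len1 + 1):
--         for j in range(1, len2 + 1):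
--             cost = 0 if s1[i - 1] == s2[j - 1] else 1
--
--             matrix[i][j] = min(
--                 matrix[i - 1][j] + 1,      # deletion
--                 matrix[i][j - 1] + 1,      # insertion
--                 matrix[i - 1][j - 1] + cost # substitution
--             )
--
--             if i > 1 and j > 1 and s1[i - 1] == s2[j - 2] and s1[i - 2] == s2[j - 1]:
--                 matrix[i][j] = min(matrix[i][j], matrix[i - 2][j - 2] + cost)
--
--     return matrix
-- ===== SOURCE B (Python) =====
-- def _osa_matrix(s1, s2) -> list:
--     """Anti-diagonal wavefront: compute each diagonal s (cells (i, s-i)) as a list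
--     from the previous diagonals, then read the matrix off the diagonals."""
--     len1, len2 = len(s1), len(s2)
--     diags = []
--     for s in range(len1 + len2 + 1):
--         lo = max(0, s - len2)
--         lo1 = max(0, s - 1 - len2)
--         lo2 = max(0, s - 2 - len2)
--         lo4 = max(0, s - 4 - len2)
--         p = diags[s - 1] if s >= 1 else None
--         pp = diags[s - 2] if s >= 2 else None
--         p4 = diags[s - 4] if s >= 4 else None
--         cur = []
--         for i in range(lo, min(len1, s) + 1):
--             j = s - i
--             if i == 0 or j == 0:
--                 cur.append(i + j)
--                 continue
--             cost = 0 if s1[i - 1] == s2[j - 1] else 1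
--             d = min(p[i - 1 - lo1] + 1, p[i - lo1] + 1, pp[i - 1 - lo2] + cost)
--             if i > 1 and j > 1 and s1[i - 1] == s2[j - 2] and s1[i - 2] == s2[j - 1]:
--                 d = min(d, p4[i - 2 - lo4] + cost)
--             cur.append(d)
--         diags.append(cur)
--     return [[diags[i + j][i - max(0, i + j - len2)] for j in range(len2 + 1)]
--             for i in range(len1 + 1)]
-- ===== Notes on version B (the rewrite author's own statement) =====
-- stated objective: alternative
-- what changed: A fills a preallocated 2D matrix in place row by row with nested index loops; B has no mutable matrix at all: it evaluates the recurrence in anti-diagonal (wavefront) order, computing each diagonal as a fresh list from the previously computed diagonals, and only at the end reads the full matrix off the stored diagonals.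
import Mathlib
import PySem

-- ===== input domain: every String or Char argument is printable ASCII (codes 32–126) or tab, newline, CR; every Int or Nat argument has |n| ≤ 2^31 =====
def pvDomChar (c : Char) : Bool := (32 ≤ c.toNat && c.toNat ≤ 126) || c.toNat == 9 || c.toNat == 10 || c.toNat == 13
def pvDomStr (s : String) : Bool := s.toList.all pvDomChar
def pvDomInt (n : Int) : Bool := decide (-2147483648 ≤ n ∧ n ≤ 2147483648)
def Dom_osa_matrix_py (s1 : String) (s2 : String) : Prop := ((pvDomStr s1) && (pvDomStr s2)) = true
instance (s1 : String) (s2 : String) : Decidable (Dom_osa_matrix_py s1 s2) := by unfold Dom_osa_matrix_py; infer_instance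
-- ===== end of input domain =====

-- B replaces A's in-place row-by-row matrix filling by an anti-diagonal (wavefront)
-- evaluation: each diagonal is built as a fresh list from the previously computed
-- diagonals, the matrix being read off the stored diagonals at the end
-- (alternative decomposition, same cost).

-- ===== PORT A =====
-- all matrix accesses in A are in range by construction, so Python's m[i][j] is ported as getD
def pvCell (m : List (List Int)) (i j : Nat) : Int := (m.getD i []).getD j 0
def pvSet (m : List (List Int)) (i j : Nat) (v : Int) : List (List Int) :=
  m.set i ((m.getD i []).set j v)

def osa_matrix_py (s1 : String) (s2 : String) : List (List Int) :=
  let t1 := s1.toList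
  let t2 := s2.toList
  let len1 := t1.length
  let len2 := t2.length
  let m0 := List.replicate (len1 + 1) (List.replicate (len2 + 1) (0 : Int))
  let m1 := (List.range (len1 + 1)).foldl (fun m i => pvSet m i 0 (i : Int)) m0
  let m2 := (List.range (len2 + 1)).foldl (fun m j => pvSet m 0 j (j : Int)) m1
  (List.range' 1 len1).foldl (fun m i =>
    (List.range' 1 len2).foldl (fun m j =>
      let cost : Int := if t1.getD (i - 1) ' ' = t2.getD (j - 1) ' ' then 0 else 1
      let m' := pvSet m i j (min (min (pvCell m (i - 1) j + 1) (pvCell m i (j - 1) + 1))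
                                 (pvCell m (i - 1) (j - 1) + cost))
      if 1 < i ∧ 1 < j ∧ t1.getD (i - 1) ' ' = t2.getD (j - 2) ' ' ∧
          t1.getD (i - 2) ' ' = t2.getD (j - 1) ' ' then
        pvSet m' i j (min (pvCell m' i j) (pvCell m' (i - 2) (j - 2) + cost))
      else m') m) m2

-- ===== PORT B =====
-- all diagonal accesses in B are in range by construction, so Python's xs[k] is ported as getD
def osa_matrix_py_alt (s1 : String) (s2 : String) : List (List Int) :=
  let t1 := s1.toList
  let t2 := s2.toList
  let len1 := t1.length
  let len2 := t2.length
  -- Python's max(0, e) over Nat subtraction is the Nat subtraction itself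
  let diags := (List.range (len1 + len2 + 1)).foldl (fun (diags : List (List Int)) s =>
    let lo := s - len2
    let lo1 := s - 1 - len2
    let lo2 := s - 2 - len2
    let lo4 := s - 4 - len2
    let p := if 1 ≤ s then diags.getD (s - 1) [] else []
    let pp := if 2 ≤ s then diags.getD (s - 2) [] else []
    let p4 := if 4 ≤ s then diags.getD (s - 4) [] else []
    let cur := (List.range' lo (min len1 s + 1 - lo)).foldl (fun (cur : List Int) i =>
      let j := s - i
      if i = 0 ∨ j = 0 then cur ++ [((i + j : Nat) : Int)]
      else
        let cost : Int := if t1.getD (i - 1) ' ' = t2.getD (j - 1) ' ' then 0 else 1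
        let d0 := min (min (p.getD (i - 1 - lo1) 0 + 1) (p.getD (i - lo1) 0 + 1))
                      (pp.getD (i - 1 - lo2) 0 + cost)
        let d := if 1 < i ∧ 1 < j ∧ t1.getD (i - 1) ' ' = t2.getD (j - 2) ' ' ∧
            t1.getD (i - 2) ' ' = t2.getD (j - 1) ' ' then
          min d0 (p4.getD (i - 2 - lo4) 0 + cost)
        else d0
        cur ++ [d]) []
    diags ++ [cur]) []
  (List.range (len1 + 1)).map (fun i =>
    (List.range (len2 + 1)).map (fun j =>
      (diags.getD (i + j) []).getD (i - (i + j - len2)) 0))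

-- ===== PRECONDITION & SPEC =====
def Spec_osa_matrix_py (s1 : String) (s2 : String) (out : List (List Int)) : Prop := out = osa_matrix_py_alt s1 s2
instance (s1 : String) (s2 : String) (out : List (List Int)) : Decidable (Spec_osa_matrix_py s1 s2 out) := by unfold Spec_osa_matrix_py; infer_instance

-- ===== CLAIM (what is proved, stated in full; the proofs are below) =====
def Claim_equal_osa_matrix_py : Prop := ∀ (s1 : String) (s2 : String), Dom_osa_matrix_py s1 s2 → Spec_osa_matrix_py s1 s2 (osa_matrix_py s1 s2)

-- ===== LEMMAS AND PROOFS =====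

-- the OSA recurrence, common mathematical description of both programs
def pvD (t1 t2 : List Char) : Nat → Nat → Int
  | i, 0 => (i : Int)
  | 0, j + 1 => ((j : Int) + 1)
  | i + 1, j + 1 =>
      let cost : Int := if t1.getD i ' ' = t2.getD j ' ' then 0 else 1
      let base := min (min (pvD t1 t2 i (j + 1) + 1) (pvD t1 t2 (i + 1) j + 1))
                      (pvD t1 t2 i j + cost)
      if 0 < i ∧ 0 < j ∧ t1.getD i ' ' = t2.getD (j - 1) ' ' ∧
          t1.getD (i - 1) ' ' = t2.getD j ' ' then
        min base (pvD t1 t2 (i - 1) (j - 1) + cost)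
      else base
  termination_by i j => i + j

def pvRow (t1 t2 : List Char) (i : Nat) : List Int :=
  (List.range (t2.length + 1)).map (fun j => pvD t1 t2 i j)

def pvMat (t1 t2 : List Char) : List (List Int) :=
  (List.range (t1.length + 1)).map (fun i => pvRow t1 t2 i)

lemma pvD_zero_right (t1 t2 : List Char) (i : Nat) : pvD t1 t2 i 0 = (i : Int) := by
  cases i <;> simp [pvD]

lemma pvD_zero_left (t1 t2 : List Char) (j : Nat) : pvD t1 t2 0 j = (j : Int) := by
  cases j <;> simp [pvD]

lemma pvD_succ_succ (t1 t2 : List Char) (a b : Nat) :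
    pvD t1 t2 (a + 1) (b + 1) =
      (if 0 < a ∧ 0 < b ∧ t1.getD a ' ' = t2.getD (b - 1) ' ' ∧
          t1.getD (a - 1) ' ' = t2.getD b ' ' then
        min (min (min (pvD t1 t2 a (b + 1) + 1) (pvD t1 t2 (a + 1) b + 1))
              (pvD t1 t2 a b + (if t1.getD a ' ' = t2.getD b ' ' then 0 else 1)))
          (pvD t1 t2 (a - 1) (b - 1) + (if t1.getD a ' ' = t2.getD b ' ' then 0 else 1))
      else
        min (min (pvD t1 t2 a (b + 1) + 1) (pvD t1 t2 (a + 1) b + 1))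
          (pvD t1 t2 a b + (if t1.getD a ' ' = t2.getD b ' ' then 0 else 1))) := by
  rw [pvD]

-- ===== B side: wavefront fold fills the memo with pvD =====

-- the step function of B's outer fold (definitionally the lambda in the port)
def pvB3Step (t1 t2 : List Char) (diags : List (List Int)) (s : Nat) : List (List Int) :=
  let lo := s - t2.length
  let lo1 := s - 1 - t2.length
  let lo2 := s - 2 - t2.length
  let lo4 := s - 4 - t2.length
  let p := if 1 ≤ s then diags.getD (s - 1) [] else []
  let pp := if 2 ≤ s then diags.getD (s - 2) [] else []
  let p4 := if 4 ≤ s then diags.getD (s - 4) [] else []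
  let cur := (List.range' lo (min t1.length s + 1 - lo)).foldl (fun (cur : List Int) i =>
    let j := s - i
    if i = 0 ∨ j = 0 then cur ++ [((i + j : Nat) : Int)]
    else
      let cost : Int := if t1.getD (i - 1) ' ' = t2.getD (j - 1) ' ' then 0 else 1
      let d0 := min (min (p.getD (i - 1 - lo1) 0 + 1) (p.getD (i - lo1) 0 + 1))
                    (pp.getD (i - 1 - lo2) 0 + cost)
      let d := if 1 < i ∧ 1 < j ∧ t1.getD (i - 1) ' ' = t2.getD (j - 2) ' ' ∧
          t1.getD (i - 2) ' ' = t2.getD (j - 1) ' ' then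
        min d0 (p4.getD (i - 2 - lo4) 0 + cost)
      else d0
      cur ++ [d]) []
  diags ++ [cur]

-- diagonal s of the pvD table, as B stores it
def pvDiag (t1 t2 : List Char) (s : Nat) : List Int :=
  (List.range' (s - t2.length) (min t1.length s + 1 - (s - t2.length))).map
    (fun i => pvD t1 t2 i (s - i))

lemma getD_map_range {β : Type} (f : Nat → β) (d : β) {n k : Nat} (hk : k < n) :
    ((List.range n).map f).getD k d = f k := by
  simp [List.getD_eq_getElem?_getD, hk]

lemma getD_map_range' (f : Nat → Int) (a : Nat) {n k : Nat} (hk : k < n) :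
    ((List.range' a n).map f).getD k 0 = f (a + k) := by
  simp [List.getD_eq_getElem?_getD, hk]

-- the value B computes for an interior cell of diagonal s is pvD
lemma pvB3_cell (t1 t2 : List Char) (s i : Nat) (hs : s ≤ t1.length + t2.length)
    (hlo : s - t2.length ≤ i) (hhi : i ≤ min t1.length s)
    (hi0 : ¬(i = 0 ∨ s - i = 0)) :
    (let j := s - i
     let cost : Int := if t1.getD (i - 1) ' ' = t2.getD (j - 1) ' ' then 0 else 1
     let d0 := min (min ((pvDiag t1 t2 (s - 1)).getD (i - 1 - (s - 1 - t2.length)) 0 + 1)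
                        ((pvDiag t1 t2 (s - 1)).getD (i - (s - 1 - t2.length)) 0 + 1))
                   ((pvDiag t1 t2 (s - 2)).getD (i - 1 - (s - 2 - t2.length)) 0 + cost)
     if 1 < i ∧ 1 < j ∧ t1.getD (i - 1) ' ' = t2.getD (j - 2) ' ' ∧
         t1.getD (i - 2) ' ' = t2.getD (j - 1) ' ' then
       min d0 ((pvDiag t1 t2 (s - 4)).getD (i - 2 - (s - 4 - t2.length)) 0 + cost)
     else d0)
    = pvD t1 t2 i (s - i) := by
  have hi1 : i ≠ 0 := by tauto
  have hj1 : s - i ≠ 0 := by tauto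
  have hil : i ≤ t1.length := by omega
  have his : i ≤ s := by omega
  obtain ⟨c, rfl⟩ : ∃ c, i = c + 1 := ⟨i - 1, by omega⟩
  obtain ⟨e, he⟩ : ∃ e, s - (c + 1) = e + 1 := ⟨s - (c + 1) - 1, by omega⟩
  have hsum : s = c + e + 2 := by omega
  have hew : e + 1 ≤ t2.length := by omega
  have g1 : (pvDiag t1 t2 (s - 1)).getD (c - (s - 1 - t2.length)) 0
      = pvD t1 t2 c (e + 1) := by
    unfold pvDiag
    rw [getD_map_range' _ _ (by omega)]
    have : s - 1 - t2.length + (c - (s - 1 - t2.length)) = c := by omega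
    rw [this]
    congr 1
    omega
  have g2 : (pvDiag t1 t2 (s - 1)).getD (c + 1 - (s - 1 - t2.length)) 0
      = pvD t1 t2 (c + 1) e := by
    unfold pvDiag
    rw [getD_map_range' _ _ (by omega)]
    have : s - 1 - t2.length + (c + 1 - (s - 1 - t2.length)) = c + 1 := by omega
    rw [this]
    congr 1
    omega
  have g3 : (pvDiag t1 t2 (s - 2)).getD (c - (s - 2 - t2.length)) 0
      = pvD t1 t2 c e := by
    unfold pvDiag
    rw [getD_map_range' _ _ (by omega)]
    have : s - 2 - t2.length + (c - (s - 2 - t2.length)) = c := by omega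
    rw [this]
    congr 1
    omega
  simp only [he, g1, g2, g3,
    show c + 1 - 1 = c from by omega, show e + 1 - 1 = e from by omega,
    show e + 1 - 2 = e - 1 from by omega, show c + 1 - 2 = c - 1 from by omega]
  rw [pvD_succ_succ]
  by_cases hg : 0 < c ∧ 0 < e ∧ t1.getD c ' ' = t2.getD (e - 1) ' ' ∧
      t1.getD (c - 1) ' ' = t2.getD e ' '
  · rw [if_pos (show 1 < c + 1 ∧ 1 < e + 1 ∧ t1.getD c ' ' = t2.getD (e - 1) ' ' ∧
          t1.getD (c - 1) ' ' = t2.getD e ' ' from ⟨by omega, by omega, hg.2.2.1, hg.2.2.2⟩),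
        if_pos hg]
    have g4 : (pvDiag t1 t2 (s - 4)).getD (c + 1 - 2 - (s - 4 - t2.length)) 0
        = pvD t1 t2 (c - 1) (e - 1) := by
      unfold pvDiag
      rw [getD_map_range' _ _ (by omega)]
      have : s - 4 - t2.length + (c + 1 - 2 - (s - 4 - t2.length)) = c - 1 := by omega
      rw [this]
      congr 1
      omega
    rw [show c + 1 - 2 = c - 1 from by omega] at g4
    rw [g4]
  · rw [if_neg (show ¬(1 < c + 1 ∧ 1 < e + 1 ∧ t1.getD c ' ' = t2.getD (e - 1) ' ' ∧
          t1.getD (c - 1) ' ' = t2.getD e ' ') from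
        fun hh => hg ⟨by omega, by omega, hh.2.2.1, hh.2.2.2⟩),
        if_neg hg]

-- B's inner fold builds the diagonal as a map
lemma pvB3_inner (t1 t2 : List Char) (s : Nat) (hs : s ≤ t1.length + t2.length)
    (diags : List (List Int)) (hd : diags = (List.range s).map (pvDiag t1 t2))
    (k : Nat) (hk : k ≤ min t1.length s + 1 - (s - t2.length)) :
    (List.range' (s - t2.length) k).foldl (fun (cur : List Int) i =>
      let j := s - i
      if i = 0 ∨ j = 0 then cur ++ [((i + j : Nat) : Int)]
      else
        let cost : Int := if t1.getD (i - 1) ' ' = t2.getD (j - 1) ' ' then 0 else 1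
        let d0 := min (min ((if 1 ≤ s then diags.getD (s - 1) [] else []).getD
                              (i - 1 - (s - 1 - t2.length)) 0 + 1)
                           ((if 1 ≤ s then diags.getD (s - 1) [] else []).getD
                              (i - (s - 1 - t2.length)) 0 + 1))
                      ((if 2 ≤ s then diags.getD (s - 2) [] else []).getD
                         (i - 1 - (s - 2 - t2.length)) 0 + cost)
        let d := if 1 < i ∧ 1 < j ∧ t1.getD (i - 1) ' ' = t2.getD (j - 2) ' ' ∧
            t1.getD (i - 2) ' ' = t2.getD (j - 1) ' ' then
          min d0 ((if 4 ≤ s then diags.getD (s - 4) [] else []).getD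
                    (i - 2 - (s - 4 - t2.length)) 0 + cost)
        else d0
        cur ++ [d]) []
    = (List.range' (s - t2.length) k).map (fun i => pvD t1 t2 i (s - i)) := by
  induction k with
  | zero => rfl
  | succ k ih =>
    rw [List.range'_concat, List.foldl_append, List.foldl_cons, List.foldl_nil,
        List.map_append, ih (by omega)]
    simp only [List.map_cons, List.map_nil, Nat.one_mul]
    set i := s - t2.length + k with hi
    by_cases h0 : i = 0 ∨ s - i = 0
    · rw [if_pos h0]
      have hv : ((i + (s - i) : Nat) : Int) = pvD t1 t2 i (s - i) := by
        rcases h0 with h0 | h0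
        · rw [h0, pvD_zero_left]
          simp
        · rw [h0, pvD_zero_right]
          simp
      rw [hv]
    · rw [if_neg h0]
      -- the three (or four) diagonals looked up really are previous pvDiag rows
      have hs1 : (1 ≤ s) := by omega
      have hs2 : (2 ≤ s) := by omega
      have hp : (if 1 ≤ s then diags.getD (s - 1) [] else []) = pvDiag t1 t2 (s - 1) := by
        rw [if_pos hs1, hd, getD_map_range _ _ (by omega)]
      have hpp : (if 2 ≤ s then diags.getD (s - 2) [] else []) = pvDiag t1 t2 (s - 2) := by
        rw [if_pos hs2, hd, getD_map_range _ _ (by omega)]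
      rw [hp, hpp]
      by_cases hg : 1 < i ∧ 1 < s - i ∧ t1.getD (i - 1) ' ' = t2.getD (s - i - 2) ' ' ∧
          t1.getD (i - 2) ' ' = t2.getD (s - i - 1) ' '
      · have hs4 : (4 ≤ s) := by omega
        have hp4 : (if 4 ≤ s then diags.getD (s - 4) [] else []) = pvDiag t1 t2 (s - 4) := by
          rw [if_pos hs4, hd, getD_map_range _ _ (by omega)]
        rw [hp4, if_pos hg]
        have := pvB3_cell t1 t2 s i hs (by omega) (by omega) h0
        simp only [if_pos hg] at this
        rw [this]
      · rw [if_neg hg]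
        have := pvB3_cell t1 t2 s i hs (by omega) (by omega) h0
        simp only [if_neg hg] at this
        rw [this]

lemma pvB3_outer (t1 t2 : List Char) (S : Nat) (hS : S ≤ t1.length + t2.length + 1) :
    (List.range S).foldl (pvB3Step t1 t2) [] = (List.range S).map (pvDiag t1 t2) := by
  induction S with
  | zero => rfl
  | succ S ih =>
    rw [List.range_succ, List.foldl_append, List.foldl_cons, List.foldl_nil,
        List.map_append, ih (by omega)]
    show pvB3Step t1 t2 ((List.range S).map (pvDiag t1 t2)) S
      = (List.range S).map (pvDiag t1 t2) ++ [pvDiag t1 t2 S]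
    unfold pvB3Step
    simp only []
    rw [pvB3_inner t1 t2 S (by omega) _ rfl
        (min t1.length S + 1 - (S - t2.length)) le_rfl]
    rfl

theorem alt_eq_mat (s1 s2 : String) :
    osa_matrix_py_alt s1 s2 = pvMat s1.toList s2.toList := by
  set t1 := s1.toList
  set t2 := s2.toList
  show (List.range (t1.length + 1)).map (fun i =>
      (List.range (t2.length + 1)).map (fun j =>
        (((List.range (t1.length + t2.length + 1)).foldl (pvB3Step t1 t2) []).getD
          (i + j) []).getD (i - (i + j - t2.length)) 0))
    = pvMat t1 t2
  rw [pvB3_outer t1 t2 (t1.length + t2.length + 1) le_rfl]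
  unfold pvMat pvRow
  apply List.map_congr_left
  intro i hi
  apply List.map_congr_left
  intro j hj
  rw [List.mem_range] at hi hj
  rw [getD_map_range _ _ (by omega)]
  unfold pvDiag
  rw [getD_map_range' _ _ (by omega)]
  have : i + j - t2.length + (i - (i + j - t2.length)) = i := by omega
  rw [this]
  congr 1
  omega

-- ===== A side =====
def pvStepAIn (t1 t2 : List Char) (i : Nat) (m : List (List Int)) (j : Nat) : List (List Int) :=
  let cost : Int := if t1.getD (i - 1) ' ' = t2.getD (j - 1) ' ' then 0 else 1
  let m' := pvSet m i j (min (min (pvCell m (i - 1) j + 1) (pvCell m i (j - 1) + 1))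
                             (pvCell m (i - 1) (j - 1) + cost))
  if 1 < i ∧ 1 < j ∧ t1.getD (i - 1) ' ' = t2.getD (j - 2) ' ' ∧
      t1.getD (i - 2) ' ' = t2.getD (j - 1) ' ' then
    pvSet m' i j (min (pvCell m' i j) (pvCell m' (i - 2) (j - 2) + cost))
  else m'

def pvStepAOut (t1 t2 : List Char) (m : List (List Int)) (i : Nat) : List (List Int) :=
  (List.range' 1 t2.length).foldl (pvStepAIn t1 t2 i) m

lemma length_pvSet (m : List (List Int)) (i j : Nat) (v : Int) :
    (pvSet m i j v).length = m.length := by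
  simp [pvSet]

lemma getD_pvSet_ne (m : List (List Int)) {a i : Nat} (h : a ≠ i) (j : Nat) (v : Int) :
    (pvSet m i j v).getD a [] = m.getD a [] := by
  simp [pvSet, List.getD_eq_getElem?_getD, Ne.symm h]

lemma rowlen_pvSet (m : List (List Int)) (a i j : Nat) (v : Int) :
    ((pvSet m i j v).getD a []).length = (m.getD a []).length := by
  by_cases h : a = i
  · subst h
    by_cases hi : a < m.length
    · simp [pvSet, List.getD_eq_getElem?_getD, hi]
    · simp [pvSet, List.getD_eq_getElem?_getD, hi]
  · rw [getD_pvSet_ne m h]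

lemma pvCell_pvSet_ne (m : List (List Int)) {a b i j : Nat} (h : a ≠ i ∨ b ≠ j) (v : Int) :
    pvCell (pvSet m i j v) a b = pvCell m a b := by
  by_cases ha : a = i
  · subst ha
    have hb : b ≠ j := h.resolve_left (by simp)
    by_cases hi : a < m.length
    · simp [pvCell, pvSet, List.getD_eq_getElem?_getD, hi, Ne.symm hb]
    · simp [pvCell, pvSet, List.getD_eq_getElem?_getD, hi]
  · unfold pvCell
    rw [getD_pvSet_ne m ha]

lemma pvCell_pvSet_self (m : List (List Int)) (i j : Nat) (v : Int)
    (hi : i < m.length) (hj : j < (m.getD i []).length) :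
    pvCell (pvSet m i j v) i j = v := by
  rw [List.getD_eq_getElem m [] hi] at hj
  simp [pvCell, pvSet, List.getD_eq_getElem?_getD, hi, hj]

def pvShape (t1 t2 : List Char) (m : List (List Int)) : Prop :=
  m.length = t1.length + 1 ∧ ∀ a, a ≤ t1.length → (m.getD a []).length = t2.length + 1

lemma pvShape_pvSet (t1 t2 : List Char) (m : List (List Int)) (i j : Nat) (v : Int)
    (hs : pvShape t1 t2 m) : pvShape t1 t2 (pvSet m i j v) := by
  refine ⟨by rw [length_pvSet]; exact hs.1, fun a ha => ?_⟩
  rw [rowlen_pvSet]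
  exact hs.2 a ha

def pvVal (t1 t2 : List Char) (k a b : Nat) : Int :=
  if a ≤ k then pvD t1 t2 a b else if b = 0 then (a : Int) else 0

def pvValIn (t1 t2 : List Char) (i l a b : Nat) : Int :=
  if a < i then pvD t1 t2 a b
  else if a = i ∧ b ≤ l then pvD t1 t2 a b
  else if b = 0 then (a : Int) else 0

lemma phase1A (t1 t2 : List Char) (n : Nat) (hn : n ≤ t1.length + 1) :
    pvShape t1 t2 ((List.range n).foldl (fun m i => pvSet m i 0 (i : Int))
        (List.replicate (t1.length + 1) (List.replicate (t2.length + 1) (0 : Int)))) ∧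
    ∀ a b, pvCell ((List.range n).foldl (fun m i => pvSet m i 0 (i : Int))
        (List.replicate (t1.length + 1) (List.replicate (t2.length + 1) (0 : Int)))) a b
      = if a < n ∧ b = 0 then (a : Int) else 0 := by
  induction n with
  | zero =>
    refine ⟨⟨by simp, fun a ha => ?_⟩, fun a b => ?_⟩
    · simp [List.getD_eq_getElem?_getD, Nat.lt_succ_of_le ha]
    · rw [if_neg (by omega)]
      simp only [List.range_zero, List.foldl_nil, pvCell, List.getD_eq_getElem?_getD,
        List.getElem?_replicate]
      split <;> simp
  | succ n ih =>
    obtain ⟨hs, hc⟩ := ih (by omega)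
    rw [List.range_succ, List.foldl_append, List.foldl_cons, List.foldl_nil]
    refine ⟨pvShape_pvSet _ _ _ _ _ _ hs, fun a b => ?_⟩
    by_cases hab : a = n ∧ b = 0
    · obtain ⟨rfl, rfl⟩ := hab
      rw [pvCell_pvSet_self _ _ _ _ (by rw [hs.1]; omega)
            (by rw [hs.2 a (by omega)]; omega)]
      rw [if_pos ⟨by omega, rfl⟩]
    · rw [pvCell_pvSet_ne _ (by tauto) _, hc a b]
      by_cases h1 : a < n ∧ b = 0
      · rw [if_pos h1, if_pos ⟨by omega, h1.2⟩]
      · rw [if_neg h1, if_neg (by omega)]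

lemma phase2A (t1 t2 : List Char) (n : Nat) (hn : n ≤ t2.length + 1) :
    pvShape t1 t2 ((List.range n).foldl (fun m j => pvSet m 0 j (j : Int))
        ((List.range (t1.length + 1)).foldl (fun m i => pvSet m i 0 (i : Int))
          (List.replicate (t1.length + 1) (List.replicate (t2.length + 1) (0 : Int))))) ∧
    ∀ a b, pvCell ((List.range n).foldl (fun m j => pvSet m 0 j (j : Int))
        ((List.range (t1.length + 1)).foldl (fun m i => pvSet m i 0 (i : Int))
          (List.replicate (t1.length + 1) (List.replicate (t2.length + 1) (0 : Int))))) a b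
      = if a = 0 ∧ b < n then (b : Int)
        else if b = 0 ∧ a < t1.length + 1 then (a : Int) else 0 := by
  induction n with
  | zero =>
    obtain ⟨hs, hc⟩ := phase1A t1 t2 (t1.length + 1) le_rfl
    refine ⟨hs, fun a b => ?_⟩
    rw [List.range_zero, List.foldl_nil, hc a b]
    split_ifs <;> first | rfl | omega
  | succ n ih =>
    obtain ⟨hs, hc⟩ := ih (by omega)
    rw [show List.range (n + 1) = List.range n ++ [n] from List.range_succ,
        List.foldl_append, List.foldl_cons, List.foldl_nil]
    refine ⟨pvShape_pvSet _ _ _ _ _ _ hs, fun a b => ?_⟩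
    by_cases hab : a = 0 ∧ b = n
    · obtain ⟨rfl, rfl⟩ := hab
      rw [pvCell_pvSet_self _ _ _ _ (by rw [hs.1]; omega)
            (by rw [hs.2 0 (by omega)]; omega)]
      rw [if_pos ⟨rfl, by omega⟩]
    · rw [pvCell_pvSet_ne _ (by tauto) _, hc a b]
      split_ifs <;> first | rfl | omega

lemma pvValIn_succ_ne (t1 t2 : List Char) (i l a b : Nat) (hab : ¬(a = i ∧ b = l + 1)) :
    pvValIn t1 t2 i l a b = pvValIn t1 t2 i (l + 1) a b := by
  unfold pvValIn
  by_cases q1 : a < i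
  · rw [if_pos q1, if_pos q1]
  · rw [if_neg q1, if_neg q1]
    by_cases q2 : a = i ∧ b ≤ l
    · rw [if_pos q2, if_pos (show a = i ∧ b ≤ l + 1 from ⟨q2.1, by omega⟩)]
    · rw [if_neg q2, if_neg (show ¬(a = i ∧ b ≤ l + 1) from fun hh => q2 ⟨hh.1, by
        have hbne : b ≠ l + 1 := fun e => hab ⟨hh.1, e⟩
        omega⟩)]

theorem stepA (t1 t2 : List Char) (i l : Nat) (hi1 : 1 ≤ i) (hi2 : i ≤ t1.length)
    (hl : l < t2.length) (m : List (List Int)) (hs : pvShape t1 t2 m)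
    (hc : ∀ a b, a ≤ t1.length → b ≤ t2.length → pvCell m a b = pvValIn t1 t2 i l a b) :
    pvShape t1 t2 (pvStepAIn t1 t2 i m (l + 1)) ∧
    ∀ a b, a ≤ t1.length → b ≤ t2.length →
      pvCell (pvStepAIn t1 t2 i m (l + 1)) a b = pvValIn t1 t2 i (l + 1) a b := by
  have hlen : i < m.length := by rw [hs.1]; omega
  have hrow : l + 1 < (m.getD i []).length := by rw [hs.2 i hi2]; omega
  have r1 : pvCell m (i - 1) (l + 1) = pvD t1 t2 (i - 1) (l + 1) := by
    rw [hc (i - 1) (l + 1) (by omega) (by omega)]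
    unfold pvValIn
    rw [if_pos (show i - 1 < i by omega)]
  have r2 : pvCell m i l = pvD t1 t2 i l := by
    rw [hc i l hi2 (by omega)]
    unfold pvValIn
    rw [if_neg (show ¬ i < i by omega), if_pos (show i = i ∧ l ≤ l from ⟨rfl, le_rfl⟩)]
  have r3 : pvCell m (i - 1) l = pvD t1 t2 (i - 1) l := by
    rw [hc (i - 1) l (by omega) (by omega)]
    unfold pvValIn
    rw [if_pos (show i - 1 < i by omega)]
  have e1 : l + 1 - 1 = l := by omega
  have e2 : l + 1 - 2 = l - 1 := by omega
  simp only [pvStepAIn, e1, e2]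
  rw [r1, r2, r3]
  by_cases hg : 1 < i ∧ 1 < l + 1 ∧ t1.getD (i - 1) ' ' = t2.getD (l - 1) ' ' ∧
      t1.getD (i - 2) ' ' = t2.getD l ' '
  · rw [if_pos hg]
    have c1 := pvCell_pvSet_self m i (l + 1)
      (min (min (pvD t1 t2 (i - 1) (l + 1) + 1) (pvD t1 t2 i l + 1))
        (pvD t1 t2 (i - 1) l + if t1.getD (i - 1) ' ' = t2.getD l ' ' then 0 else 1))
      hlen hrow
    have c2 : pvCell (pvSet m i (l + 1)
        (min (min (pvD t1 t2 (i - 1) (l + 1) + 1) (pvD t1 t2 i l + 1))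
          (pvD t1 t2 (i - 1) l + if t1.getD (i - 1) ' ' = t2.getD l ' ' then 0 else 1)))
        (i - 2) (l - 1) = pvD t1 t2 (i - 2) (l - 1) := by
      rw [pvCell_pvSet_ne m (Or.inl (by omega)) _,
          hc (i - 2) (l - 1) (by omega) (by omega)]
      unfold pvValIn
      rw [if_pos (show i - 2 < i by omega)]
    rw [c1, c2]
    refine ⟨pvShape_pvSet _ _ _ _ _ _ (pvShape_pvSet _ _ _ _ _ _ hs), fun a b ha hb => ?_⟩
    by_cases hab : a = i ∧ b = l + 1
    · obtain ⟨rfl, rfl⟩ := hab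
      rw [pvCell_pvSet_self _ _ _ _ (by rw [length_pvSet]; exact hlen)
            (by rw [rowlen_pvSet]; exact hrow)]
      unfold pvValIn
      rw [if_neg (show ¬ a < a by omega),
          if_pos (show a = a ∧ l + 1 ≤ l + 1 from ⟨rfl, le_rfl⟩)]
      obtain ⟨c, rfl⟩ : ∃ c, a = c + 1 := ⟨a - 1, by omega⟩
      rw [pvD_succ_succ,
          if_pos (show 0 < c ∧ 0 < l ∧ t1.getD c ' ' = t2.getD (l - 1) ' ' ∧
              t1.getD (c - 1) ' ' = t2.getD l ' ' from
            ⟨by omega, by omega, hg.2.2.1, hg.2.2.2⟩)]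
      have e3 : c + 1 - 1 = c := by omega
      have e4 : c + 1 - 2 = c - 1 := by omega
      simp only [e3, e4]
    · rw [pvCell_pvSet_ne _ (by tauto) _, pvCell_pvSet_ne m (by tauto) _,
          hc a b ha hb, pvValIn_succ_ne t1 t2 i l a b hab]
  · rw [if_neg hg]
    refine ⟨pvShape_pvSet _ _ _ _ _ _ hs, fun a b ha hb => ?_⟩
    by_cases hab : a = i ∧ b = l + 1
    · obtain ⟨rfl, rfl⟩ := hab
      rw [pvCell_pvSet_self m _ _ _ hlen hrow]
      unfold pvValIn
      rw [if_neg (show ¬ a < a by omega),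
          if_pos (show a = a ∧ l + 1 ≤ l + 1 from ⟨rfl, le_rfl⟩)]
      obtain ⟨c, rfl⟩ : ∃ c, a = c + 1 := ⟨a - 1, by omega⟩
      rw [pvD_succ_succ,
          if_neg (show ¬(0 < c ∧ 0 < l ∧ t1.getD c ' ' = t2.getD (l - 1) ' ' ∧
              t1.getD (c - 1) ' ' = t2.getD l ' ') from
            fun hh => hg ⟨by omega, by omega, hh.2.2.1, hh.2.2.2⟩)]
      have e3 : c + 1 - 1 = c := by omega
      have e4 : c + 1 - 2 = c - 1 := by omega
      simp only [e3]
    · rw [pvCell_pvSet_ne m (by tauto) _, hc a b ha hb,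
          pvValIn_succ_ne t1 t2 i l a b hab]

lemma innerA (t1 t2 : List Char) (i : Nat) (hi1 : 1 ≤ i) (hi2 : i ≤ t1.length)
    (m : List (List Int)) (hs : pvShape t1 t2 m)
    (hc : ∀ a b, a ≤ t1.length → b ≤ t2.length → pvCell m a b = pvValIn t1 t2 i 0 a b)
    (l : Nat) (hl : l ≤ t2.length) :
    pvShape t1 t2 ((List.range' 1 l).foldl (pvStepAIn t1 t2 i) m) ∧
    ∀ a b, a ≤ t1.length → b ≤ t2.length →
      pvCell ((List.range' 1 l).foldl (pvStepAIn t1 t2 i) m) a b = pvValIn t1 t2 i l a b := by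
  induction l with
  | zero => exact ⟨hs, hc⟩
  | succ l ih =>
    obtain ⟨hs', hc'⟩ := ih (by omega)
    rw [List.range'_concat, List.foldl_append, List.foldl_cons, List.foldl_nil]
    have h1l : 1 + 1 * l = l + 1 := by omega
    rw [h1l]
    exact stepA t1 t2 i l hi1 hi2 (by omega) _ hs' hc'

lemma pvVal_eq_pvValIn_zero (t1 t2 : List Char) (k a b : Nat) :
    pvVal t1 t2 k a b = pvValIn t1 t2 (k + 1) 0 a b := by
  unfold pvVal pvValIn
  by_cases h1 : a ≤ k
  · rw [if_pos h1, if_pos (show a < k + 1 by omega)]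
  · rw [if_neg h1, if_neg (show ¬ a < k + 1 by omega)]
    by_cases h2 : b = 0
    · subst h2
      by_cases h3 : a = k + 1
      · rw [if_pos (show a = k + 1 ∧ (0 : Nat) ≤ 0 from ⟨h3, le_rfl⟩),
            if_pos (show (0 : Nat) = 0 from rfl), h3, pvD_zero_right]
      · rw [if_neg (show ¬(a = k + 1 ∧ (0 : Nat) ≤ 0) from fun hh => h3 hh.1),
            if_pos (show (0 : Nat) = 0 from rfl)]
    · rw [if_neg (show ¬(a = k + 1 ∧ b ≤ 0) from fun hh => h2 (Nat.le_zero.mp hh.2))]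

lemma pvValIn_full_eq_pvVal (t1 t2 : List Char) (k a b : Nat) (hb : b ≤ t2.length) :
    pvValIn t1 t2 (k + 1) t2.length a b = pvVal t1 t2 (k + 1) a b := by
  unfold pvValIn pvVal
  by_cases h1 : a < k + 1
  · rw [if_pos h1, if_pos (show a ≤ k + 1 by omega)]
  · rw [if_neg h1]
    by_cases h2 : a = k + 1
    · rw [if_pos (show a = k + 1 ∧ b ≤ t2.length from ⟨h2, hb⟩),
          if_pos (show a ≤ k + 1 by omega)]
    · rw [if_neg (show ¬(a = k + 1 ∧ b ≤ t2.length) from fun hh => h2 hh.1),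
          if_neg (show ¬ a ≤ k + 1 by omega)]

lemma outerA (t1 t2 : List Char) (m : List (List Int)) (hs : pvShape t1 t2 m)
    (hc : ∀ a b, a ≤ t1.length → b ≤ t2.length → pvCell m a b = pvVal t1 t2 0 a b)
    (k : Nat) (hk : k ≤ t1.length) :
    pvShape t1 t2 ((List.range' 1 k).foldl (pvStepAOut t1 t2) m) ∧
    ∀ a b, a ≤ t1.length → b ≤ t2.length →
      pvCell ((List.range' 1 k).foldl (pvStepAOut t1 t2) m) a b = pvVal t1 t2 k a b := by
  induction k with
  | zero => exact ⟨hs, hc⟩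
  | succ k ih =>
    obtain ⟨hs', hc'⟩ := ih (by omega)
    rw [List.range'_concat, List.foldl_append, List.foldl_cons, List.foldl_nil]
    have h1k : 1 + 1 * k = k + 1 := by omega
    rw [h1k]
    have hc0 : ∀ a b, a ≤ t1.length → b ≤ t2.length →
        pvCell ((List.range' 1 k).foldl (pvStepAOut t1 t2) m) a b
          = pvValIn t1 t2 (k + 1) 0 a b := by
      intro a b ha hb
      rw [hc' a b ha hb, pvVal_eq_pvValIn_zero]
    obtain ⟨hs2, hc2⟩ := innerA t1 t2 (k + 1) (by omega) (by omega) _ hs' hc0 t2.length le_rfl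
    refine ⟨hs2, fun a b ha hb => ?_⟩
    show pvCell ((List.range' 1 t2.length).foldl (pvStepAIn t1 t2 (k + 1))
        ((List.range' 1 k).foldl (pvStepAOut t1 t2) m)) a b = pvVal t1 t2 (k + 1) a b
    rw [hc2 a b ha hb, pvValIn_full_eq_pvVal t1 t2 k a b hb]

lemma eq_pvMat (t1 t2 : List Char) (m : List (List Int)) (hs : pvShape t1 t2 m)
    (hc : ∀ a b, a ≤ t1.length → b ≤ t2.length → pvCell m a b = pvD t1 t2 a b) :
    m = pvMat t1 t2 := by
  have hlm : (pvMat t1 t2).length = t1.length + 1 := by simp [pvMat]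
  apply List.ext_getElem (by rw [hs.1, hlm])
  intro a h1 h2
  rw [show (pvMat t1 t2)[a] = pvRow t1 t2 a from by
        simp [pvMat]]
  have ha : a ≤ t1.length := by rw [hs.1] at h1; omega
  have hrl : m[a].length = t2.length + 1 := by
    rw [← List.getD_eq_getElem m [] h1]
    exact hs.2 a ha
  apply List.ext_getElem (by rw [hrl]; simp [pvRow])
  intro b hb1 hb2
  have hbb : b ≤ t2.length := by rw [hrl] at hb1; omega
  have := hc a b ha hbb
  unfold pvCell at this
  rw [List.getD_eq_getElem m [] h1, List.getD_eq_getElem m[a] 0 hb1] at this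
  rw [this]
  simp [pvRow, List.getElem_map]

theorem a_eq_mat (s1 s2 : String) :
    osa_matrix_py s1 s2 = pvMat s1.toList s2.toList := by
  show (List.range' 1 s1.toList.length).foldl (pvStepAOut s1.toList s2.toList)
      ((List.range (s2.toList.length + 1)).foldl (fun m j => pvSet m 0 j (j : Int))
        ((List.range (s1.toList.length + 1)).foldl (fun m i => pvSet m i 0 (i : Int))
          (List.replicate (s1.toList.length + 1)
            (List.replicate (s2.toList.length + 1) (0 : Int)))))
    = pvMat s1.toList s2.toList
  obtain ⟨hs, hc⟩ := phase2A s1.toList s2.toList (s2.toList.length + 1) le_rfl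
  have hc0 : ∀ a b, a ≤ s1.toList.length → b ≤ s2.toList.length →
      pvCell ((List.range (s2.toList.length + 1)).foldl (fun m j => pvSet m 0 j (j : Int))
        ((List.range (s1.toList.length + 1)).foldl (fun m i => pvSet m i 0 (i : Int))
          (List.replicate (s1.toList.length + 1)
            (List.replicate (s2.toList.length + 1) (0 : Int))))) a b
      = pvVal s1.toList s2.toList 0 a b := by
    intro a b ha hb
    rw [hc a b]
    unfold pvVal
    split_ifs <;>
      first
      | rfl
      | omega
      | (rw [show a = 0 from by omega, pvD_zero_left])
  obtain ⟨hs2, hc2⟩ := outerA s1.toList s2.toList _ hs hc0 s1.toList.length le_rfl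
  apply eq_pvMat _ _ _ hs2
  intro a b ha hb
  rw [hc2 a b ha hb]
  unfold pvVal
  rw [if_pos ha]

-- ===== VERDICT (by name: the statement is the Claim_ definition above) =====
theorem osa_matrix_py_spec : Claim_equal_osa_matrix_py := by
  intro s1 s2 _
  unfold Spec_osa_matrix_py
  rw [a_eq_mat, alt_eq_mat]
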